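-- pv_equiv track=rewrite | github.com/LeonorLC/LA-II | Treino1/hacker.py | hacker
-- ===== SOURCE A (Python) =====
-- def repetidos(l_final, x):
--     if len(l_final) == 0:
--         return False
--     for elem in l_final:
--         if elem[1] == x[1]:
--             return True
--     return False
--
-- def conta (cartao):
--     conta=0
--     for digito in cartao[0]:
--         if digito != '*':
--               conta+=1
--     return conta
--
-- def hacker(log):
--     i=0
--     x=''
--     l_aux = []
--     l_final = []
--     number_final = []
--     for i,x in enumerate(log):
--         l_aux.append(x)
--         for p,e in enumerate(log[i+1:]):
--             if x[1] == e[1]: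
--                 l_aux.append(e)
--         if len(l_aux) > 1 and not repetidos(l_final, l_aux[0]):
--             number_final = list(l_aux[0][0])
--             for number in l_aux[1:]:
--                 for pos, digito in enumerate(list(number)[0]):
--                     if digito != '*':
--                         number_final[pos] = digito
--             l_final.append((''.join(number_final), l_aux[0][1]))
--         else:
--             if not repetidos(l_final, x):
--                 l_final.append(x)
--         l_aux = []
--     l_sorted=sorted(l_final, key=conta, reverse= True)
--     l_aux2 = []
--     resultado = []
--     i=0
--     for i,elem in enumerate(l_sorted):
--         count = conta(elem)
--         l_aux2.append(elem)
--         for elem2 in l_sorted[i+1:]: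
--             if count == conta(elem2):
--                 l_aux2.append(elem2)
--                 l_sorted.remove(elem2)
--         resultado += sorted(l_aux2, key=lambda x: x[1])
--         l_aux2 = []
--
--     return resultado
-- ===== SOURCE B (Python) =====
-- def conta(e):
--     return sum(d != '*' for d in e[0])
--
-- def hacker(log):
--     groups = {}  # key -> list of card chars, first-occurrence order
--     for card, k in log:
--         if k in groups:
--             g = groups[k]
--             for pos, d in enumerate(card):
--                 if d != '*':
--                     g[pos] = d
--         else:
--             groups[k] = list(card)
--     final = [(''.join(chars), k) for k, chars in groups.items()]
--     return sorted(final, key=lambda e: (-conta(e), e[1]))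
-- ===== Notes on version B (the rewrite author's own statement) =====
-- stated objective: faster
-- what changed: A's three quadratic passes (per-entry lookahead scan over the rest of the log, membership rescans of the accumulator, and a sort followed by regrouping with in-place removal and per-group sorts) are replaced by one dict-grouping pass over the log and a single sort on the key (-conta(e), e[1]).
import Mathlib
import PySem

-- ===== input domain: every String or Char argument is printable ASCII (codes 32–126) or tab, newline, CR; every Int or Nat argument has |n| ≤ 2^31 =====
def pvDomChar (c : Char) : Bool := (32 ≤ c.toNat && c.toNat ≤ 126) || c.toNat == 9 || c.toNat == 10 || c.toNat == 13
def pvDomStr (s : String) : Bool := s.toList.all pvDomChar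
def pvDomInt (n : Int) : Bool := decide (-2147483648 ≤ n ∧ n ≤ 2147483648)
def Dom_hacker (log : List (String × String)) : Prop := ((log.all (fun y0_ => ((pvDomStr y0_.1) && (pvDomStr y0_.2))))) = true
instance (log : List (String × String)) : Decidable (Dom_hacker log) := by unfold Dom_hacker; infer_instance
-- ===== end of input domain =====

-- B replaces A's quadratic rescans (lookahead grouping, repeated-membership dedup, sort-then-regroup
-- with in-place removal) by one dict-grouping pass plus a single sort on the key (-conta, account).

-- ===== PORT A =====
def repetidos (l_final : List (String × String)) (x : String × String) : Bool :=
  if l_final.length == 0 then false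
  else l_final.any (fun elem => elem.2 == x.2)   -- first-match loop 'for elem in l_final: if elem[1]==x[1]: return True'

def conta (cartao : String × String) : Int :=
  cartao.1.toList.foldl (fun n digito => if digito != '*' then n + 1 else n) 0

-- body of A's first loop at (i, x); log[i+1:] is the slice.
-- 'number_final[pos] = digito' raises IndexError in Python when pos ≥ len(number_final);
-- pySetD is its total form — Pre_hacker excludes exactly those inputs.
-- l_aux[0] = x throughout (l_aux starts as [x] and only appends).
def hackerStep (log : List (String × String)) (l_final : List (String × String))
    (ix : Int × (String × String)) : List (String × String) :=
  let x := ix.2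
  let l_aux : List (String × String) :=
    (PySem.List.slice log (some (ix.1 + 1)) none).foldl
      (fun la e => if x.2 == e.2 then la ++ [e] else la) [x]
  if 1 < l_aux.length ∧ ¬ repetidos l_final x then
    let number_final := x.1.toList              -- list(l_aux[0][0])
    let merged := (l_aux.drop 1).foldl
      (fun nf number =>
        (PySem.List.enumerate number.1.toList 0).foldl
          (fun nf pd => if pd.2 != '*' then PySem.List.pySetD nf pd.1 pd.2 else nf) nf)
      number_final
    l_final ++ [(String.ofList merged, x.2)]    -- ''.join(number_final)
  else if ¬ repetidos l_final x then l_final ++ [x] else l_final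

-- A's second loop: 'for i, elem in enumerate(l_sorted)' while removing, from positions > i, the
-- elements with the same conta (l_final's entries are pairwise distinct — keys are unique — so
-- 'l_sorted.remove(elem2)' removes exactly the occurrence seen in the snapshot slice).
def phase2 (l_sorted : List (String × String)) (i : Nat) (resultado : List (String × String)) :
    List (String × String) :=
  if h : i < l_sorted.length then
    let elem := l_sorted[i]
    let count := conta elem
    let l_aux2 := elem :: ((l_sorted.drop (i+1)).filter (fun e2 => conta e2 == count))
    let l_sorted' := l_sorted.take (i+1) ++ (l_sorted.drop (i+1)).filter (fun e2 => conta e2 != count)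
    phase2 l_sorted' (i+1) (resultado ++ PySem.List.sorted l_aux2 (fun x => x.2))
  else resultado
termination_by l_sorted.length - i
decreasing_by
  have h2 := List.length_filter_le (fun e2 => conta e2 != conta l_sorted[i]) (l_sorted.drop (i+1))
  simp_all [List.length_append, List.length_drop]; omega

def hacker (log : List (String × String)) : List (String × String) :=
  let l_final := (PySem.List.enumerate log 0).foldl (hackerStep log) []
  let l_sorted := PySem.List.sorted l_final conta true
  phase2 l_sorted 0 []

-- ===== PORT B =====
def conta_alt (e : String × String) : Int :=
  (e.1.toList.map (fun d => if d != '*' then (1 : Int) else 0)).sum    -- sum(d != '*' for d in e[0])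

-- 'g[pos] = d' raises IndexError in Python when pos ≥ len(g); pySetD is its total form —
-- Pre_hacker excludes exactly those inputs.
def overwrite (g : List Char) (card : String) : List Char :=
  (PySem.List.enumerate card.toList 0).foldl
    (fun g pd => if pd.2 != '*' then PySem.List.pySetD g pd.1 pd.2 else g) g

def hacker_alt (log : List (String × String)) : List (String × String) :=
  let groups := log.foldl
    (fun d ck =>
      if d.contains ck.2 then d.modify ck.2 [] (fun g => overwrite g ck.1)
      else d.insert ck.2 ck.1.toList)
    PySem.Dict.empty
  let final := groups.items.map (fun kv => (String.ofList kv.2, kv.1))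
  -- sorted(final, key=lambda e: (-conta(e), e[1])): Python's tuple order is the lexicographic one
  PySem.List.sorted final (fun e => toLex (-(conta_alt e), e.2))

-- ===== PRECONDITION & SPEC =====
-- Pre_ excludes exactly the logs on which Python A raises IndexError (and B does too): some entry
-- carries a non-'*' digit at a position beyond the length of the first card recorded for its account.
def Pre_hacker (log : List (String × String)) : Prop :=
  ∀ e ∈ log,
    ((e.1.toList.drop (((log.find? (fun y => y.2 == e.2)).getD e).1.toList.length)).all
      (fun d => d == '*')) = true
instance (log : List (String × String)) : Decidable (Pre_hacker log) := by
  unfold Pre_hacker; infer_instance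

def pvWitness_hacker : (List (String × String)) := [("1*3", "a"), ("*2*", "a"), ("77", "b")]

def Spec_hacker (log : List (String × String)) (out : List (String × String)) : Prop := out = hacker_alt log
instance (log : List (String × String)) (out : List (String × String)) : Decidable (Spec_hacker log out) := by unfold Spec_hacker; infer_instance

-- ===== CLAIM (what is proved, stated in full; the proofs are below) =====
def Claim_equal_hacker : Prop := ∀ (log : List (String × String)), Dom_hacker log → Pre_hacker log → Spec_hacker log (hacker log)

-- ===== LEMMAS AND PROOFS =====

-- merging one masked card (as a char list) into the accumulated digits
def ow (g : List Char) (c : List Char) : List Char :=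
  (PySem.List.enumerate c 0).foldl
    (fun g pd => if pd.2 != '*' then PySem.List.pySetD g pd.1 pd.2 else g) g

def mergeChars (g : List Char) (cs : List (List Char)) : List Char := cs.foldl ow g

-- the common shape of both phase-1 results: for each account, in first-occurrence order,
-- the first card merged (left to right) with all its later cards
def news : List (String × String) → List String → List (String × List Char)
  | [], _ => []
  | x :: t, seen =>
    if x.2 ∈ seen then news t seen
    else (x.2, mergeChars x.1.toList ((t.filter (fun e => x.2 == e.2)).map (fun e => e.1.toList)))
          :: news t (x.2 :: seen)

def render (kv : String × List Char) : String × String := (String.ofList kv.2, kv.1)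

-- A's step with the slice log[i+1:] abstracted as t
def aStepT (lf : List (String × String)) (x : String × String) (t : List (String × String)) :
    List (String × String) :=
  let l_aux := t.foldl (fun la e => if x.2 == e.2 then la ++ [e] else la) [x]
  if 1 < l_aux.length ∧ ¬ repetidos lf x then
    lf ++ [(String.ofList
      ((l_aux.drop 1).foldl (fun nf number => ow nf number.1.toList) x.1.toList), x.2)]
  else if ¬ repetidos lf x then lf ++ [x] else lf

def aRec : List (String × String) → List (String × String) → List (String × String)
  | lf, [] => lf
  | lf, x :: t => aRec (aStepT lf x t) t

theorem hackerStep_eq (log lf : List (String × String)) (k : Nat) (x : String × String) :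
    hackerStep log lf ((k : Int), x) = aStepT lf x (log.drop (k+1)) := by
  have hc : ((k : Int) + 1) = ((k + 1 : Nat) : Int) := by push_cast; ring
  simp only [hackerStep, aStepT, ow, hc, PySem.List.slice_from_natCast]

theorem foldl_enum_eq (log : List (String × String)) :
    ∀ (t : List (String × String)) (k : Nat) (lf : List (String × String)), log.drop k = t →
      (PySem.List.enumerate t (k : Int)).foldl (hackerStep log) lf = aRec lf t := by
  intro t
  induction t with
  | nil => intro k lf _; simp [PySem.List.enumerate_nil, aRec]
  | cons x rest ih =>
    intro k lf hdrop
    have hrest : log.drop (k+1) = rest := by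
      have := congrArg List.tail hdrop
      simpa [List.tail_drop] using this
    rw [PySem.List.enumerate_cons]
    simp only [List.foldl_cons]
    have hc : (k : Int) + 1 = ((k + 1 : Nat) : Int) := by push_cast; ring
    rw [hackerStep_eq log lf k x, hrest, hc, ih (k+1) _ hrest]
    rfl

theorem repetidos_iff (lf : List (String × String)) (x : String × String) :
    repetidos lf x = true ↔ x.2 ∈ lf.map (·.2) := by
  cases lf with
  | nil => simp [repetidos]
  | cons a l =>
    simp only [repetidos, List.length_cons]
    rw [if_neg (by simp)]
    simp only [List.any_eq_true, List.mem_map, beq_iff_eq]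

theorem news_congr : ∀ (t : List (String × String)) (s₁ s₂ : List String),
    (∀ k, k ∈ s₁ ↔ k ∈ s₂) → news t s₁ = news t s₂ := by
  intro t
  induction t with
  | nil => intro s₁ s₂ _; simp [news]
  | cons x t ih =>
    intro s₁ s₂ h
    simp only [news]
    by_cases hm : x.2 ∈ s₁
    · rw [if_pos hm, if_pos ((h _).mp hm)]
      exact ih _ _ h
    · rw [if_neg hm, if_neg (fun hmem => hm ((h _).mpr hmem))]
      have : ∀ k, k ∈ x.2 :: s₁ ↔ k ∈ x.2 :: s₂ := by
        intro k; simp [h k]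
      rw [ih _ _ this]

theorem aRec_eq : ∀ (t lf : List (String × String)),
    aRec lf t = lf ++ (news t (lf.map (·.2))).map render := by
  intro t
  induction t with
  | nil => intro lf; simp [aRec, news]
  | cons x t ih =>
    intro lf
    show aRec (aStepT lf x t) t = _
    by_cases hrep : x.2 ∈ lf.map (·.2)
    · have hr : repetidos lf x = true := (repetidos_iff lf x).mpr hrep
      have hstep : aStepT lf x t = lf := by simp [aStepT, hr]
      rw [hstep, ih lf]
      simp only [news, if_pos hrep]
    · have hr : ¬ (repetidos lf x = true) := fun h => hrep ((repetidos_iff lf x).mp h)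
      have hla : t.foldl (fun la e => if x.2 == e.2 then la ++ [e] else la) [x]
          = [x] ++ (t.filter (fun e => x.2 == e.2)) := by
        have h0 := PySem.List.foldl_append_if (fun e => x.2 == e.2) (fun e => e) t [x]
        simpa using h0
      have hseen : ∀ k, k ∈ (lf.map (·.2)) ++ [x.2] ↔ k ∈ x.2 :: lf.map (·.2) := by
        intro k; simp [or_comm]
      by_cases hne : t.filter (fun e => x.2 == e.2) = []
      · have hstep : aStepT lf x t = lf ++ [x] := by
          simp only [aStepT, hla, hne, List.append_nil]
          rw [if_neg (by simp), if_pos hr]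
        rw [hstep, ih (lf ++ [x])]
        rw [show (lf ++ [x]).map (fun y => y.2) = (lf.map (fun y => y.2)) ++ [x.2] by simp]
        rw [news_congr t _ _ hseen]
        simp only [news, if_neg hrep, hne, List.map_nil, mergeChars, List.foldl_nil,
          List.map_cons, render, String.ofList_toList, Prod.mk.eta, List.append_assoc,
          List.singleton_append]
      · have hlen : 1 < ([x] ++ t.filter (fun e => x.2 == e.2)).length := by
          have : 0 < (t.filter (fun e => x.2 == e.2)).length := List.length_pos_of_ne_nil hne
          simp only [List.length_append, List.length_cons, List.length_nil]
          omega
        have hstep : aStepT lf x t = lf ++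
            [(String.ofList (mergeChars x.1.toList
              ((t.filter (fun e => x.2 == e.2)).map (fun e => e.1.toList))), x.2)] := by
          simp only [aStepT, hla]
          rw [if_pos ⟨hlen, hr⟩]
          rw [show ([x] ++ t.filter (fun e => x.2 == e.2)).drop 1
              = t.filter (fun e => x.2 == e.2) from by simp]
          simp only [mergeChars, List.foldl_map]
        rw [hstep, ih]
        rw [show (lf ++ [(String.ofList (mergeChars x.1.toList
              ((t.filter (fun e => x.2 == e.2)).map (fun e => e.1.toList))), x.2)]).map (fun y => y.2)
            = (lf.map (fun y => y.2)) ++ [x.2] by simp]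
        rw [news_congr t _ _ hseen]
        simp only [news, if_neg hrep, List.map_cons, render, List.append_assoc,
          List.singleton_append]

theorem bfold_items : ∀ (t : List (String × String)) (d : PySem.Dict String (List Char)),
    d.keys.Nodup →
    (t.foldl (fun d ck =>
        if d.contains ck.2 then d.modify ck.2 [] (fun g => overwrite g ck.1)
        else d.insert ck.2 ck.1.toList) d).items
      = d.items.map (fun kv =>
          (kv.1, mergeChars kv.2 ((t.filter (fun e => kv.1 == e.2)).map (fun e => e.1.toList))))
        ++ news t d.keys := by
  intro t
  induction t with
  | nil =>
    intro d _
    simp [news, mergeChars]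
  | cons x t ih =>
    intro d hnd
    simp only [List.foldl_cons]
    by_cases hc : d.contains x.2 = true
    · rw [if_pos hc]
      have hkeys : (d.modify x.2 [] (fun g => overwrite g x.1)).keys = d.keys := by
        rw [PySem.Dict.keys_modify, PySem.Dict.keys_insert_of_contains d _ hc]
      have hnd' : (d.modify x.2 [] (fun g => overwrite g x.1)).keys.Nodup := by
        rw [hkeys]; exact hnd
      rw [ih _ hnd', hkeys]
      have hmem : x.2 ∈ d.keys := (PySem.Dict.contains_iff_mem_keys d x.2).mp hc
      rw [show news (x :: t) d.keys = news t d.keys from by simp only [news, if_pos hmem]]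
      congr 1
      rw [PySem.Dict.items_eq_map_keys _ hnd' [], PySem.Dict.items_eq_map_keys d hnd [], hkeys,
        List.map_map, List.map_map]
      apply List.map_congr_left
      intro k _
      have hg := PySem.Dict.getD_modify d x.2 k [] (fun g => overwrite g x.1)
      by_cases hkx : k = x.2
      · rw [hkx] at hg
        rw [if_pos rfl] at hg
        simp only [Function.comp_apply, hkx, hg]
        rw [show List.filter (fun e => x.2 == e.2) (x :: t) = x :: List.filter (fun e => x.2 == e.2) t
            from by simp]
        simp only [List.map_cons]
        rw [show mergeChars (d.getD x.2 []) (x.1.toList :: (List.filter (fun e => x.2 == e.2) t).map (fun e => e.1.toList))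
            = mergeChars (ow (d.getD x.2 []) x.1.toList) ((List.filter (fun e => x.2 == e.2) t).map (fun e => e.1.toList))
            from by simp [mergeChars]]
        rfl
      · simp only [Function.comp_apply, hg, if_neg hkx]
        rw [show List.filter (fun e => k == e.2) (x :: t) = List.filter (fun e => k == e.2) t
            from by simp [hkx]]
    · rw [if_neg hc]
      have hcf : d.contains x.2 = false := by
        cases h : d.contains x.2
        · rfl
        · exact absurd h hc
      have hkeys : (d.insert x.2 x.1.toList).keys = d.keys ++ [x.2] :=
        PySem.Dict.keys_insert_of_not_contains d _ hcf
      have hnd' : (d.insert x.2 x.1.toList).keys.Nodup := PySem.Dict.nodup_keys_insert d _ _ hnd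
      have hnotmem : x.2 ∉ d.keys := by
        intro h
        rw [(PySem.Dict.contains_iff_mem_keys d x.2).mpr h] at hcf
        simp at hcf
      rw [ih _ hnd', hkeys,
        news_congr t _ _ (show ∀ k, k ∈ d.keys ++ [x.2] ↔ k ∈ x.2 :: d.keys from
          fun k => by simp [or_comm]),
        PySem.Dict.items_insert_of_not_contains d _ hcf, List.map_append]
      rw [show news (x :: t) d.keys
          = (x.2, mergeChars x.1.toList ((t.filter (fun e => x.2 == e.2)).map (fun e => e.1.toList)))
              :: news t (x.2 :: d.keys) from by simp only [news, if_neg hnotmem]]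
      have hmapeq : d.items.map (fun kv =>
            (kv.1, mergeChars kv.2 ((List.filter (fun e => kv.1 == e.2) t).map (fun e => e.1.toList))))
          = d.items.map (fun kv =>
            (kv.1, mergeChars kv.2 ((List.filter (fun e => kv.1 == e.2) (x :: t)).map (fun e => e.1.toList)))) := by
        apply List.map_congr_left
        intro kv hkv
        have hne : kv.1 ≠ x.2 := fun h => hnotmem (h ▸ PySem.Dict.mem_keys_of_mem_items d hkv)
        rw [show List.filter (fun e => kv.1 == e.2) (x :: t) = List.filter (fun e => kv.1 == e.2) t
            from by simp [hne]]
      rw [hmapeq]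
      simp [List.append_assoc]

theorem news_keys : ∀ (t : List (String × String)) (seen : List String),
    ((news t seen).map (·.1)).Nodup ∧ ∀ k ∈ (news t seen).map (·.1), k ∉ seen := by
  intro t
  induction t with
  | nil => intro seen; simp [news]
  | cons x t ih =>
    intro seen
    simp only [news]
    by_cases hm : x.2 ∈ seen
    · rw [if_pos hm]; exact ih seen
    · rw [if_neg hm]
      obtain ⟨hnd, hnotin⟩ := ih (x.2 :: seen)
      constructor
      · simp only [List.map_cons, List.nodup_cons]
        exact ⟨fun hc => (hnotin _ hc) (by simp), hnd⟩
      · intro k hk hks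
        simp only [List.map_cons, List.mem_cons] at hk
        rcases hk with h | h
        · exact hm (h ▸ hks)
        · exact (hnotin _ h) (by simp [hks])

-- the grouped tail of A's phase 2
def gs : List (String × String) → List (String × String)
  | [] => []
  | e :: t =>
    PySem.List.sorted (e :: t.filter (fun e2 => conta e2 == conta e)) (fun x => x.2)
      ++ gs (t.filter (fun e2 => conta e2 != conta e))
termination_by l => l.length
decreasing_by
  have h := List.length_filter_le (fun x => conta x.1 != conta e) t.attach
  simp at h ⊢
  omega

theorem phase2_eq_gs : ∀ (ls : List (String × String)) (i : Nat) (res : List (String × String)),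
    phase2 ls i res = res ++ gs (ls.drop i) := by
  have gs_cons : ∀ (e : String × String) (t : List (String × String)),
      gs (e :: t) = PySem.List.sorted (e :: t.filter (fun e2 => conta e2 == conta e)) (fun x => x.2)
        ++ gs (t.filter (fun e2 => conta e2 != conta e)) := by
    intro e t; simp only [gs]
  have aux : ∀ (n : Nat) (ls : List (String × String)) (i : Nat) (res : List (String × String)),
      ls.length - i ≤ n → phase2 ls i res = res ++ gs (ls.drop i) := by
    intro n
    induction n with
    | zero =>
      intro ls i res hle
      have hge : ¬ i < ls.length := by omega
      rw [phase2, dif_neg hge, List.drop_of_length_le (by omega)]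
      simp [gs]
    | succ n ih =>
      intro ls i res hle
      by_cases h : i < ls.length
      · rw [phase2, dif_pos h]
        have hlen1 : (ls.take (i+1)).length = i + 1 := by
          simp [List.length_take]; omega
        have hdrop' : (ls.take (i+1) ++ (ls.drop (i+1)).filter (fun e2 => conta e2 != conta ls[i])).drop (i+1)
            = (ls.drop (i+1)).filter (fun e2 => conta e2 != conta ls[i]) := List.drop_left' hlen1
        have hb : (ls.take (i+1) ++ (ls.drop (i+1)).filter (fun e2 => conta e2 != conta ls[i])).length - (i+1) ≤ n := by
          have h2 := List.length_filter_le (fun e2 => conta e2 != conta ls[i]) (ls.drop (i+1))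
          simp only [List.length_append, hlen1, List.length_drop] at *
          omega
        rw [ih _ _ _ hb, hdrop', List.drop_eq_getElem_cons h, gs_cons, List.append_assoc]
      · rw [phase2, dif_neg h, List.drop_of_length_le (by omega)]
        simp [gs]
  intro ls i res
  exact aux (ls.length - i) ls i res le_rfl

theorem gs_perm : ∀ (l : List (String × String)), (gs l).Perm l := by
  have aux : ∀ (n : Nat) (l : List (String × String)), l.length ≤ n → (gs l).Perm l := by
    intro n
    induction n with
    | zero =>
      intro l hl
      cases l with
      | nil => simp [gs]
      | cons e t => simp at hl
    | succ n ih =>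
      intro l hl
      cases l with
      | nil => simp [gs]
      | cons e t =>
        rw [show gs (e :: t) = PySem.List.sorted (e :: t.filter (fun e2 => conta e2 == conta e)) (fun x => x.2)
            ++ gs (t.filter (fun e2 => conta e2 != conta e)) from by simp only [gs]]
        have h1 := PySem.List.sorted_perm (e :: t.filter (fun e2 => conta e2 == conta e)) (fun x => x.2) false
        have h2 : (gs (t.filter (fun e2 => conta e2 != conta e))).Perm (t.filter (fun e2 => conta e2 != conta e)) := by
          apply ih
          have := List.length_filter_le (fun e2 => conta e2 != conta e) t
          simp at hl
          omega
        refine (h1.append h2).trans ?_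
        show ((e :: t.filter (fun e2 => conta e2 == conta e)) ++ t.filter (fun e2 => conta e2 != conta e)).Perm (e :: t)
        rw [List.cons_append]
        apply List.Perm.cons
        have hp := List.filter_append_perm (fun e2 => conta e2 == conta e) t
        simpa [bne] using hp
  intro l
  exact aux l.length l le_rfl

theorem gs_pairwise : ∀ (l : List (String × String)), (l.map (·.2)).Nodup →
    l.Pairwise (fun a b => conta b ≤ conta a) →
    (gs l).Pairwise (fun a b =>
      (toLex (-(conta a), a.2) : Lex (Int × String)) < toLex (-(conta b), b.2)) := by
  have aux : ∀ (n : Nat) (l : List (String × String)), l.length ≤ n → (l.map (·.2)).Nodup →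
      l.Pairwise (fun a b => conta b ≤ conta a) →
      (gs l).Pairwise (fun a b =>
        (toLex (-(conta a), a.2) : Lex (Int × String)) < toLex (-(conta b), b.2)) := by
    intro n
    induction n with
    | zero =>
      intro l hl _ _
      cases l with
      | nil => simp [gs]
      | cons e t => simp at hl
    | succ n ih =>
      intro l hl hnd hpw
      cases l with
      | nil => simp [gs]
      | cons e t =>
        rw [show gs (e :: t) = PySem.List.sorted (e :: t.filter (fun e2 => conta e2 == conta e)) (fun x => x.2)
            ++ gs (t.filter (fun e2 => conta e2 != conta e)) from by simp only [gs]]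
        simp only [List.length_cons] at hl
        simp only [List.map_cons, List.nodup_cons] at hnd
        obtain ⟨hmemnd, hndt⟩ := hnd
        obtain ⟨hdesc, hpwt⟩ := List.pairwise_cons.mp hpw
        have hperm := PySem.List.sorted_perm (e :: t.filter (fun e2 => conta e2 == conta e)) (fun x => x.2) false
        have hcount : ∀ a ∈ PySem.List.sorted (e :: t.filter (fun e2 => conta e2 == conta e)) (fun x => x.2),
            conta a = conta e := by
          intro a ha
          rcases List.mem_cons.mp (hperm.subset ha) with h | h
          · rw [h]
          · exact beq_iff_eq.mp (List.mem_filter.mp h).2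
        rw [List.pairwise_append]
        refine ⟨?_, ?_, ?_⟩
        · -- inside one conta-group: keys strictly increase
          have hkeys : ((e :: t.filter (fun e2 => conta e2 == conta e)).map (·.2)).Nodup := by
            simp only [List.map_cons, List.nodup_cons]
            have hsub : ((t.filter (fun e2 => conta e2 == conta e)).map (·.2)).Sublist (t.map (·.2)) :=
              List.Sublist.map _ List.filter_sublist
            exact ⟨fun hc => hmemnd (hsub.subset hc), hsub.nodup hndt⟩
          have hsgkeys : ((PySem.List.sorted (e :: t.filter (fun e2 => conta e2 == conta e)) (fun x => x.2)).map (·.2)).Nodup :=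
            ((hperm.map (·.2)).nodup_iff).mpr hkeys
          have hle := PySem.List.sorted_pairwise (e :: t.filter (fun e2 => conta e2 == conta e)) (fun x => x.2)
          have hne2 : (PySem.List.sorted (e :: t.filter (fun e2 => conta e2 == conta e)) (fun x => x.2)).Pairwise
              (fun a b => a.2 ≠ b.2) := List.pairwise_map.mp hsgkeys
          refine (hle.and hne2).imp_of_mem ?_
          intro a b ha hb hab
          refine Prod.Lex.toLex_lt_toLex.mpr (Or.inr ⟨?_, lt_of_le_of_ne hab.1 hab.2⟩)
          rw [hcount a ha, hcount b hb]
        · -- later groups, recursively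
          apply ih
          · have := List.length_filter_le (fun e2 => conta e2 != conta e) t
            omega
          · have hsub : ((t.filter (fun e2 => conta e2 != conta e)).map (·.2)).Sublist (t.map (·.2)) :=
              List.Sublist.map _ List.filter_sublist
            exact hsub.nodup hndt
          · exact List.Pairwise.sublist List.filter_sublist hpwt
        · -- across groups: strictly smaller conta
          intro a ha b hb
          have hb' : b ∈ t.filter (fun e2 => conta e2 != conta e) :=
            (gs_perm _).subset hb
          have hbt : b ∈ t := List.mem_of_mem_filter hb'
          have hblt : conta b < conta e :=
            lt_of_le_of_ne (hdesc b hbt) (bne_iff_ne.mp (List.mem_filter.mp hb').2)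
          refine Prod.Lex.toLex_lt_toLex.mpr (Or.inl ?_)
          rw [hcount a ha]
          omega
  intro l hnd hpw
  exact aux l.length l le_rfl hnd hpw

theorem conta_alt_eq : conta_alt = conta := by
  funext e
  unfold conta conta_alt
  rw [PySem.List.foldl_count_if (fun d => d != '*') e.1.toList 0,
      PySem.List.sum_map_ite_one_zero (fun d => d != '*') e.1.toList]
  ring

-- ===== VERDICT (by name: the statement is the Claim_ definition above) =====
theorem hacker_spec : Claim_equal_hacker := by
  unfold Claim_equal_hacker
  intro log _ _
  unfold Spec_hacker
  simp only [hacker, hacker_alt]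
  have hA1 : (PySem.List.enumerate log 0).foldl (hackerStep log) [] = (news log []).map render := by
    have h0 := foldl_enum_eq log log 0 [] (by simp)
    rw [Nat.cast_zero] at h0
    rw [h0, aRec_eq log []]
    simp
  have hB1 : (log.foldl (fun d ck =>
      if d.contains ck.2 then d.modify ck.2 [] (fun g => overwrite g ck.1)
      else d.insert ck.2 ck.1.toList) PySem.Dict.empty).items = news log [] := by
    have hb := bfold_items log PySem.Dict.empty
      (by rw [PySem.Dict.keys_empty]; exact List.nodup_nil)
    rw [hb, PySem.Dict.keys_empty,
      show (PySem.Dict.empty : PySem.Dict String (List Char)).items = [] from rfl]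
    simp
  rw [hA1, hB1]
  rw [show (news log []).map (fun kv => (String.ofList kv.2, kv.1)) = (news log []).map render from rfl]
  rw [conta_alt_eq]
  have hFkeys : (((news log []).map render).map (·.2)).Nodup := by
    rw [List.map_map]
    simpa [Function.comp, render] using (news_keys log []).1
  have hperm : (gs (PySem.List.sorted ((news log []).map render) conta true)).Perm
      ((news log []).map render) :=
    (gs_perm _).trans (PySem.List.sorted_perm _ conta true)
  have hSkeys : ((PySem.List.sorted ((news log []).map render) conta true).map (·.2)).Nodup :=
    (((PySem.List.sorted_perm _ conta true).map (·.2)).nodup_iff).mpr hFkeys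
  have hdesc := PySem.List.sorted_pairwise_rev ((news log []).map render) conta
  have hpw := gs_pairwise _ hSkeys hdesc
  rw [phase2_eq_gs _ 0 [], List.drop_zero, List.nil_append]
  exact (PySem.List.sorted_eq_of_perm_of_pairwise_lt _ _ (fun e => toLex (-(conta e), e.2)) hperm hpw).symm
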